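-- pv_equiv track=rewrite | github.com/olivierinizan/emc | experiment/table1_left.py | compute_properties_metric
-- ===== SOURCE A (Python) =====
-- def compute_properties_metric(DBorYAGO_dict):
--
--     nb_p_db_or_yago = []
--     nb_triples = 0
--     l_prop = []
--     for i in DBorYAGO_dict:
--         for s,p,o in DBorYAGO_dict[i]:
--             nb_triples += 1
--             if p not in l_prop:
--                 l_prop.append(p)
--     return nb_triples, len(l_prop)
-- ===== SOURCE B (Python) =====
-- def compute_properties_metric(DBorYAGO_dict):
--     flat = [p for i in DBorYAGO_dict for s, p, o in DBorYAGO_dict[i]]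
--     ps = sorted(flat)
--     distinct = 0
--     prev = None
--     for p in ps:
--         if prev is None or p != prev:
--             distinct += 1
--         prev = p
--     return len(flat), distinct
-- ===== Notes on version B (the rewrite author's own statement) =====
-- stated objective: alternative
-- what changed: Replaces A's single per-triple loop with a linear 'p not in l_prop' seen-list by a sort-then-scan: flatten the property occurrences, sort them, and count runs of equal adjacent elements (no seen structure at all); the triple count is the flat list's length.
import Mathlib
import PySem

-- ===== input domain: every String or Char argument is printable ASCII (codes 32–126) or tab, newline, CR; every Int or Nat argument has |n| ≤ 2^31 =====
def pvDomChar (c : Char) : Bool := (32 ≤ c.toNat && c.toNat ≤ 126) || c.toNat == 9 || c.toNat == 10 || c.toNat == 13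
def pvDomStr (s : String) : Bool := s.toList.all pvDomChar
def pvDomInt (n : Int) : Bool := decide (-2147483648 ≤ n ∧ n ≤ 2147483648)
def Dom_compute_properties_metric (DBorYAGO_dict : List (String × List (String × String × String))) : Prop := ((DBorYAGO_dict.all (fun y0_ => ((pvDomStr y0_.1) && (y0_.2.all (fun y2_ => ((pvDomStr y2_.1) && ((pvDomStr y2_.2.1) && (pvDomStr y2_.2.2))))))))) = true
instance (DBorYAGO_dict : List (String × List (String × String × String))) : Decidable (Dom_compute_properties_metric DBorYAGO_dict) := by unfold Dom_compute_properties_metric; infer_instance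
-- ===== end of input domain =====

-- B replaces A's per-triple loop with a seen-list membership scan by a sort-then-scan:
-- flatten the properties, sort them, count runs of equal adjacent elements ("alternative").

-- ===== PORT A =====
-- A: one combined loop over all triples, counting and appending each unseen property.
def compute_properties_metric (DBorYAGO_dict : List (String × List (String × String × String))) : Int × Int :=
  let st :=
    DBorYAGO_dict.foldl
      (fun (acc : Int × List String) kv =>
        kv.2.foldl
          (fun (acc2 : Int × List String) t =>
            let acc2 := (acc2.1 + 1, acc2.2)
            if acc2.2.contains t.2.1 then acc2 else (acc2.1, acc2.2 ++ [t.2.1]))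
          acc)
      ((0 : Int), ([] : List String))
  (st.1, (st.2.length : Int))

-- ===== PORT B =====
-- B: flatten the property occurrences, sort them, count runs of equal adjacent elements.
def compute_properties_metric_alt (DBorYAGO_dict : List (String × List (String × String × String))) : Int × Int :=
  let flat : List String := DBorYAGO_dict.flatMap (fun kv => kv.2.map (fun t => t.2.1))
  let ps : List String := PySem.List.sorted flat (fun x => x) false
  let st : Int × Option String :=
    ps.foldl
      (fun (st : Int × Option String) p =>
        match st.2 with
        | none => (st.1 + 1, some p)
        | some q => (if p ≠ q then st.1 + 1 else st.1, some p))
      ((0 : Int), (none : Option String))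
  ((flat.length : Int), st.1)

-- ===== PRECONDITION & SPEC =====
def Spec_compute_properties_metric (DBorYAGO_dict : List (String × List (String × String × String))) (out : Int × Int) : Prop := out = compute_properties_metric_alt DBorYAGO_dict
instance (DBorYAGO_dict : List (String × List (String × String × String))) (out : Int × Int) : Decidable (Spec_compute_properties_metric DBorYAGO_dict out) := by unfold Spec_compute_properties_metric; infer_instance

-- ===== CLAIM (what is proved, stated in full; the proofs are below) =====
def Claim_equal_compute_properties_metric : Prop := ∀ (DBorYAGO_dict : List (String × List (String × String × String))), Dom_compute_properties_metric DBorYAGO_dict → Spec_compute_properties_metric DBorYAGO_dict (compute_properties_metric DBorYAGO_dict)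

-- ===== LEMMAS AND PROOFS =====

-- inner loop of A = (count bumped by the list length, properties folded with Set.add)
theorem cpm_inner (ts : List (String × String × String)) :
    ∀ (n : Int) (l : List String),
    ts.foldl
      (fun (acc2 : Int × List String) t =>
        if acc2.2.contains t.2.1 then (acc2.1 + 1, acc2.2) else (acc2.1 + 1, acc2.2 ++ [t.2.1]))
      (n, l)
    = (n + (ts.length : Int), (ts.map (fun t => t.2.1)).foldl PySem.Set.add l) := by
  induction ts with
  | nil => intro n l; simp
  | cons t ts ih =>
    intro n l
    simp only [List.foldl_cons, List.length_cons, List.map_cons]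
    rw [show (if l.contains t.2.1 then ((n + 1 : Int), l) else (n + 1, l ++ [t.2.1]))
        = ((n + 1 : Int), PySem.Set.add l t.2.1) from by
      simp only [PySem.Set.add, PySem.Set.contains]; split <;> rfl]
    rw [ih]
    congr 1
    push_cast; ring

-- outer loop of A, generalized over the accumulator
theorem cpm_outer (d : List (String × List (String × String × String))) :
    ∀ (n : Int) (l : List String),
    d.foldl
      (fun (acc : Int × List String) kv =>
        kv.2.foldl
          (fun (acc2 : Int × List String) t =>
            if acc2.2.contains t.2.1 then (acc2.1 + 1, acc2.2) else (acc2.1 + 1, acc2.2 ++ [t.2.1]))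
          acc)
      (n, l)
    = (n + ((d.flatMap (fun kv => kv.2.map (fun t => t.2.1))).length : Int),
       (d.flatMap (fun kv => kv.2.map (fun t => t.2.1))).foldl PySem.Set.add l) := by
  induction d with
  | nil => intro n l; simp
  | cons kv d ih =>
    intro n l
    simp only [List.foldl_cons, List.flatMap_cons, List.foldl_append, List.length_append]
    rw [cpm_inner, ih]
    congr 1
    · push_cast [List.length_map]; ring

-- first component of B's run-count fold, given a sorted tail with previous element q
theorem cpm_run (xs : List String) :
    ∀ (q : String) (n : Int), (q :: xs).Pairwise (· ≤ ·) →
    (xs.foldl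
      (fun (st : Int × Option String) p =>
        match st.2 with
        | none => (st.1 + 1, some p)
        | some q => (if p ≠ q then st.1 + 1 else st.1, some p))
      (n, some q)).1
    = n + ((insert q xs.toFinset).card : Int) - 1 := by
  induction xs with
  | nil => intro q n _; simp
  | cons p rest ih =>
    intro q n hp
    have hqp : q ≤ p := (List.pairwise_cons.mp hp).1 p (by simp)
    have hrest : (p :: rest).Pairwise (· ≤ ·) := (List.pairwise_cons.mp hp).2
    simp only [List.foldl_cons, List.toFinset_cons]
    by_cases hpq : p = q
    · subst hpq
      have hqrest : (p :: rest).Pairwise (· ≤ ·) := hrest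
      simp only [ne_eq, not_true_eq_false, if_false]
      rw [ih p n hqrest]
      simp
    · have : (if p ≠ q then n + 1 else n) = n + 1 := by simp [hpq]
      simp only [ne_eq, hpq, not_false_eq_true, if_true]
      rw [ih p (n + 1) hrest]
      have hq_not : q ∉ insert p rest.toFinset := by
        simp only [Finset.mem_insert, List.mem_toFinset]
        rintro (h | h)
        · exact hpq h.symm
        · -- q appears later: then p ≤ q and q ≤ p so p = q, contradiction
          have hpr : p ≤ q := by
            have := (List.pairwise_cons.mp hrest).1 q h
            exact this
          exact hpq (le_antisymm hpr hqp)
      rw [Finset.card_insert_of_notMem hq_not]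
      push_cast; ring

-- ===== VERDICT (by name: the statement is the Claim_ definition above) =====
theorem compute_properties_metric_spec : Claim_equal_compute_properties_metric := by
  intro d _
  show compute_properties_metric d = compute_properties_metric_alt d
  simp only [compute_properties_metric, compute_properties_metric_alt]
  rw [cpm_outer]
  set flat := d.flatMap (fun kv => kv.2.map (fun t => t.2.1)) with hflat
  have hset : flat.foldl PySem.Set.add ([] : List String) = PySem.Set.ofList flat :=
    (PySem.Set.ofList_eq_foldl flat).symm
  rw [hset]
  refine Prod.ext (by simp) ?_
  -- second components: |set(flat)| = run count of sorted flat
  have hlen : (PySem.Set.ofList flat).length = flat.toFinset.card := by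
    rw [← List.toFinset_card_of_nodup (PySem.Set.nodup_ofList (xs := flat))]
    congr 1
    apply Finset.ext
    intro x
    simp [PySem.Set.mem_ofList]
  have hperm : (PySem.List.sorted flat (fun x => x) false).Perm flat :=
    PySem.List.sorted_perm flat (fun x => x) false
  have hfin : (PySem.List.sorted flat (fun x => x) false).toFinset = flat.toFinset := by
    apply Finset.ext; intro x; simp [List.mem_toFinset, hperm.mem_iff]
  have hpw : (PySem.List.sorted flat (fun x => x) false).Pairwise (· ≤ ·) := by
    have := PySem.List.sorted_pairwise (xs := flat) (key := fun x => x)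
    simpa using this
  cases hs : PySem.List.sorted flat (fun x => x) false with
  | nil =>
    have : flat.toFinset = ∅ := by rw [← hfin, hs]; simp
    simp [hlen, this]
  | cons q xs =>
    have hpw' : (q :: xs).Pairwise (· ≤ ·) := hs ▸ hpw
    simp only [List.foldl_cons]
    rw [show ((0 : Int) + 1) = 1 from rfl, cpm_run xs q 1 hpw']
    have : (insert q xs.toFinset) = flat.toFinset := by
      rw [← hfin, hs]; simp
    rw [this, hlen]; ring
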